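-- pv_equiv track=rewrite | github.com/varunmitra/doc-skills | skills/aem/edge-delivery-services/aem-doc-converter/scripts/md-to-html.py | parse_eds_table
-- ===== SOURCE A (Python) =====
-- def parse_eds_table(text):
--     """
--     Parse an EDS pipe-table block (lines starting with + or |) into
--     a list of rows, where each row is a list of cell strings.
--     Returns (block_name, rows) or (None, None) if not an EDS block.
--     """
--     lines = [l for l in text.strip().splitlines() if l.strip()]
--     if not lines:
--         return None, None
--
--     rows = []
--     current_row = []
--     for line in lines:
--         stripped = line.strip()
--         if stripped.startswith("+") and set(stripped) <= set("+-=|"):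
--             if current_row:
--                 rows.append([c.strip() for c in current_row])
--                 current_row = []
--         elif stripped.startswith("|"):
--             cells = [c.strip() for c in stripped.split("|")[1:-1]]
--             if current_row:
--                 for i, c in enumerate(cells):
--                     if i < len(current_row):
--                         if c:
--                             current_row[i] = (current_row[i] + " " + c).strip()
--                     else:
--                         current_row.append(c)
--             else:
--                 current_row = cells
--
--     if current_row:
--         rows.append([c.strip() for c in current_row])
--
--     if not rows:
--         return None, None
--
--     block_name = rows[0][0].strip() if rows else ""
--     return block_name, rows
-- ===== SOURCE B (Python) =====
-- def parse_eds_table(text):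
--     """
--     Block-partition re-implementation: group the cell lines between separator
--     lines into blocks, then build each row by joining the non-empty cells of
--     each column with a single space.
--     Returns (block_name, rows) or (None, None) if not an EDS block.
--     """
--     def is_sep(s):
--         return s.startswith("+") and set(s) <= set("+-=|")
--
--     stripped = [l.strip() for l in text.strip().splitlines() if l.strip()]
--
--     blocks, cur = [], []
--     for s in stripped:
--         if is_sep(s):
--             blocks.append(cur)
--             cur = []
--         elif s.startswith("|"):
--             cur.append([c.strip() for c in s.split("|")[1:-1]])
--     blocks.append(cur)
--
--     rows = []
--     for block in blocks:
--         ncols = max((len(cs) for cs in block), default=0)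
--         if ncols == 0:
--             continue
--         rows.append([" ".join(cs[j] for cs in block if j < len(cs) and cs[j])
--                      for j in range(ncols)])
--
--     if not rows:
--         return None, None
--     return rows[0][0], rows
-- ===== Notes on version B (the rewrite author's own statement) =====
-- stated objective: alternative
-- what changed: Instead of A's single pass that carries a merged current_row and flushes it into rows at each separator, B first partitions the stripped lines into separator-delimited blocks of cell lists and then builds each row independently, computing every column as a join of that column's non-empty cells with single spaces.
import Mathlib
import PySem

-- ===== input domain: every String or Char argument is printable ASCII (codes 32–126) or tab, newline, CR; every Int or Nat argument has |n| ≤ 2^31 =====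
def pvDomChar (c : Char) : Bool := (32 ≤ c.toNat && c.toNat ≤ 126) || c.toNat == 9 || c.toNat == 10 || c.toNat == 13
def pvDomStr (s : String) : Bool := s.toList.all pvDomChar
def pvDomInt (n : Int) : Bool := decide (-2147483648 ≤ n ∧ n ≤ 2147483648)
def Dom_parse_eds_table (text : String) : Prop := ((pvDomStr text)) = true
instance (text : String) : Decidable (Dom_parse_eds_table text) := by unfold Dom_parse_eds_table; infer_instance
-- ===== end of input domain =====

-- B re-groups the lines into separator-delimited blocks and joins each column's
-- non-empty cells directly, instead of A's single flush-and-merge accumulator loop;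
-- objective: alternative decomposition (same cost).

-- ===== PORT A =====
-- 'stripped.startswith("+") and set(stripped) <= set("+-=|")'
def pvIsSepA (s : List Char) : Bool :=
  PySem.Chars.startswith s ['+'] &&
    PySem.Set.issubset (PySem.Set.ofList s) (PySem.Set.ofList ['+', '-', '=', '|'])

-- '[c.strip() for c in stripped.split("|")[1:-1]]'
def pvCellsA (s : List Char) : List (List Char) :=
  (PySem.List.slice (PySem.Chars.splitOn s ['|']) (some 1) (some (-1))).map PySem.Chars.strip

-- the body of A's 'for i, c in enumerate(cells)' merge loop
def pvMergeStepA (cur : List (List Char)) (ic : Int × List Char) : List (List Char) :=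
  if ic.1 < PySem.List.len cur then
    if ic.2 ≠ [] then
      PySem.List.pySetD cur ic.1 (PySem.Chars.strip (PySem.List.pyGetD cur ic.1 [] ++ [' '] ++ ic.2))
    else cur
  else cur ++ [ic.2]

def pvMergeA (cur : List (List Char)) (cells : List (List Char)) : List (List Char) :=
  (PySem.List.enumerate cells).foldl pvMergeStepA cur

-- the body of A's 'for line in lines' loop, state = (rows, current_row)
def pvStepA (st : List (List (List Char)) × List (List Char)) (line : List Char) :
    List (List (List Char)) × List (List Char) :=
  let s := PySem.Chars.strip line
  if pvIsSepA s then
    if st.2 ≠ [] then (st.1 ++ [st.2.map PySem.Chars.strip], []) else (st.1, st.2)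
  else if PySem.Chars.startswith s ['|'] then
    if st.2 ≠ [] then (st.1, pvMergeA st.2 (pvCellsA s)) else (st.1, pvCellsA s)
  else (st.1, st.2)

-- rows[0][0] always exists when rows is non-empty (every appended row is non-empty),
-- so the headD defaults are never used.
def parse_eds_table (text : String) : Option String × Option (List (List String)) :=
  let lines := (PySem.Chars.splitlines (PySem.Chars.strip text.toList)).filter
      (fun l => PySem.Chars.strip l ≠ [])
  if lines = [] then (none, none)
  else
    let st := lines.foldl pvStepA ([], [])
    let rows := if st.2 ≠ [] then st.1 ++ [st.2.map PySem.Chars.strip] else st.1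
    if rows = [] then (none, none)
    else
      (some (String.ofList (PySem.Chars.strip ((rows.headD []).headD []))),
       some (rows.map (fun r => r.map String.ofList)))

-- ===== PORT B =====
def pvIsSepB (s : List Char) : Bool :=
  PySem.Chars.startswith s ['+'] &&
    PySem.Set.issubset (PySem.Set.ofList s) (PySem.Set.ofList ['+', '-', '=', '|'])

def pvCellsB (s : List Char) : List (List Char) :=
  (PySem.List.slice (PySem.Chars.splitOn s ['|']) (some 1) (some (-1))).map PySem.Chars.strip

-- B's grouping loop, state = (blocks, cur)
def pvBlocksStepB (st : List (List (List (List Char))) × List (List (List Char))) (s : List Char) :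
    List (List (List (List Char))) × List (List (List Char)) :=
  if pvIsSepB s then (st.1 ++ [st.2], [])
  else if PySem.Chars.startswith s ['|'] then (st.1, st.2 ++ [pvCellsB s])
  else st

-- 'max((len(cs) for cs in block), default=0)'
def pvNcolsB (block : List (List (List Char))) : Int :=
  PySem.List.maxD (block.map PySem.List.len) (fun n => n) 0

-- '" ".join(cs[j] for cs in block if j < len(cs) and cs[j])'
def pvColB (block : List (List (List Char))) (j : Int) : List Char :=
  PySem.Chars.join [' ']
    ((block.filter (fun cs => decide (j < PySem.List.len cs) && decide (PySem.List.pyGetD cs j [] ≠ []))).map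
      (fun cs => PySem.List.pyGetD cs j []))

def pvRowB (block : List (List (List Char))) : List (List Char) :=
  (PySem.List.pyRange 0 (pvNcolsB block) 1).map (pvColB block)

def parse_eds_table_alt (text : String) : Option String × Option (List (List String)) :=
  let stripped := ((PySem.Chars.splitlines (PySem.Chars.strip text.toList)).filter
      (fun l => PySem.Chars.strip l ≠ [])).map PySem.Chars.strip
  let st := stripped.foldl pvBlocksStepB ([], [])
  let blocks := st.1 ++ [st.2]
  let rows := blocks.foldl (fun rows block =>
      if pvNcolsB block = 0 then rows else rows ++ [pvRowB block]) []
  if rows = [] then (none, none)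
  else
    (some (String.ofList ((rows.headD []).headD [])),
     some (rows.map (fun r => r.map String.ofList)))

-- ===== PRECONDITION & SPEC =====
def Spec_parse_eds_table (text : String) (out : Option String × Option (List (List String))) : Prop := out = parse_eds_table_alt text
instance (text : String) (out : Option String × Option (List (List String))) : Decidable (Spec_parse_eds_table text out) := by unfold Spec_parse_eds_table; infer_instance

-- ===== CLAIM (what is proved, stated in full; the proofs are below) =====
def Claim_equal_parse_eds_table : Prop := ∀ (text : String), Dom_parse_eds_table text → Spec_parse_eds_table text (parse_eds_table text)

-- ===== LEMMAS AND PROOFS =====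

-- a cell is "clean" when stripping it changes nothing
def pvClean (x : List Char) : Prop := PySem.Chars.strip x = x

theorem pvDropWhile_eq_self (p : Char → Bool) (x : List Char)
    (h : ∀ a ∈ x.head?, p a = false) : List.dropWhile p x = x := by
  cases x with
  | nil => rfl
  | cons b t => simp [h b rfl]

theorem pvHead_not_of_dropWhile_eq_self (p : Char → Bool) (x : List Char)
    (h : List.dropWhile p x = x) : ∀ a ∈ x.head?, p a = false := by
  cases x with
  | nil => simp
  | cons b t =>
    intro a ha
    obtain rfl : b = a := by simpa using ha
    by_contra hb
    rw [List.dropWhile_cons, if_pos (by simpa using hb)] at h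
    have h1 := List.length_dropWhile_le p t
    have h2 := congrArg List.length h
    simp at h2; omega

theorem pvClean_iff (x : List Char) :
    pvClean x ↔ (∀ a ∈ x.head?, PySem.Chars.isspace a = false) ∧
      (∀ a ∈ x.getLast?, PySem.Chars.isspace a = false) := by
  unfold pvClean PySem.Chars.strip PySem.Chars.rstrip PySem.Chars.lstrip
  constructor
  · intro h
    have hlen := congrArg List.length h
    have l1 := List.length_dropWhile_le PySem.Chars.isspace x
    have l2 := List.length_dropWhile_le PySem.Chars.isspace
      (List.dropWhile PySem.Chars.isspace x).reverse
    simp at hlen l2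
    have h1 : List.dropWhile PySem.Chars.isspace x = x :=
      (List.dropWhile_suffix _).eq_of_length (by omega)
    rw [h1] at h
    have h2 : List.dropWhile PySem.Chars.isspace x.reverse = x.reverse := by
      have := congrArg List.reverse h; simpa using this
    refine ⟨pvHead_not_of_dropWhile_eq_self _ _ h1, ?_⟩
    intro a ha
    exact pvHead_not_of_dropWhile_eq_self _ _ h2 a (by rwa [List.head?_reverse])
  · rintro ⟨h1, h2⟩
    rw [pvDropWhile_eq_self _ _ h1]
    rw [pvDropWhile_eq_self _ _ (by intro a ha; exact h2 a (by rwa [List.head?_reverse] at ha))]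
    simp

theorem pvHead?_dropWhile (p : Char → Bool) (l : List Char) :
    ∀ a ∈ (List.dropWhile p l).head?, p a = false := by
  intro a ha
  have h := List.head?_dropWhile_not p l
  rw [show (List.dropWhile p l).head? = some a from ha] at h
  exact h

theorem pvHead?_of_prefix {l₁ l₂ : List Char} (h : l₁ <+: l₂) (a : Char)
    (ha : l₁.head? = some a) : l₂.head? = some a := by
  obtain ⟨r, rfl⟩ := h
  cases l₁ with
  | nil => simp at ha
  | cons b t => simpa using ha

theorem pvStrip_clean (y : List Char) : pvClean (PySem.Chars.strip y) := by
  rw [pvClean_iff]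
  constructor
  · intro a ha
    have hpre : PySem.Chars.strip y <+: List.dropWhile PySem.Chars.isspace y := by
      unfold PySem.Chars.strip PySem.Chars.rstrip PySem.Chars.lstrip
      have hsuf := List.dropWhile_suffix (l := (List.dropWhile PySem.Chars.isspace y).reverse)
        PySem.Chars.isspace
      have := List.reverse_prefix.mpr hsuf
      simpa using this
    exact pvHead?_dropWhile _ _ a (pvHead?_of_prefix hpre a ha)
  · intro a ha
    have hl : (PySem.Chars.strip y).getLast? =
        (List.dropWhile PySem.Chars.isspace
          (List.dropWhile PySem.Chars.isspace y).reverse).head? := by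
      unfold PySem.Chars.strip PySem.Chars.rstrip PySem.Chars.lstrip
      rw [List.getLast?_eq_head?_reverse]
      simp
    exact pvHead?_dropWhile _ _ a (hl ▸ ha)

theorem pvStrip_idem (x : List Char) :
    PySem.Chars.strip (PySem.Chars.strip x) = PySem.Chars.strip x := pvStrip_clean x

-- strip of 'x + " " + c' for clean x and clean non-empty c
theorem pvStrip_sep (x c : List Char) (hx : pvClean x) (hc : pvClean c) (hc0 : c ≠ []) :
    PySem.Chars.strip (x ++ [' '] ++ c) = if x = [] then c else x ++ [' '] ++ c := by
  rw [pvClean_iff] at hx hc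
  have hlast : ∀ a ∈ (x ++ [' '] ++ c).getLast?, PySem.Chars.isspace a = false := by
    intro a ha
    rw [List.getLast?_append] at ha
    cases hgl : c.getLast? with
    | none => rw [List.getLast?_eq_none_iff] at hgl; exact absurd hgl hc0
    | some b =>
      rw [hgl] at ha
      have hb : b = a := by simpa using ha
      subst hb
      exact hc.2 b hgl
  cases x with
  | nil =>
    rw [if_pos rfl]
    unfold PySem.Chars.strip PySem.Chars.rstrip PySem.Chars.lstrip
    have e1 : List.dropWhile PySem.Chars.isspace (' ' :: c) = List.dropWhile PySem.Chars.isspace c := by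
      rw [List.dropWhile_cons, if_pos (by decide)]
    have e2 : List.dropWhile PySem.Chars.isspace c = c := pvDropWhile_eq_self _ _ hc.1
    have e3 : List.dropWhile PySem.Chars.isspace c.reverse = c.reverse :=
      pvDropWhile_eq_self _ _ (by intro a ha; exact hc.2 a (by rwa [List.head?_reverse] at ha))
    simp only [List.nil_append, List.singleton_append]
    rw [e1, e2, e3, List.reverse_reverse]
  | cons b xt =>
    rw [if_neg (by simp)]
    unfold PySem.Chars.strip PySem.Chars.rstrip PySem.Chars.lstrip
    have e1 : List.dropWhile PySem.Chars.isspace ((b :: xt) ++ [' '] ++ c) =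
        (b :: xt) ++ [' '] ++ c := by
      apply pvDropWhile_eq_self
      intro a ha
      have hb : b = a := by simpa using ha
      subst hb
      exact hx.1 b rfl
    have e2 : List.dropWhile PySem.Chars.isspace ((b :: xt) ++ [' '] ++ c).reverse =
        ((b :: xt) ++ [' '] ++ c).reverse := by
      apply pvDropWhile_eq_self
      intro a ha
      rw [List.head?_reverse] at ha
      exact hlast a ha
    rw [e1, e2, List.reverse_reverse]

-- recursive characterisation of A's merge loop
def pvMergeRec : List (List Char) → List (List Char) → List (List Char)
  | r, [] => r
  | [], c :: cs => c :: pvMergeRec [] cs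
  | x :: r, c :: cs =>
      (if c ≠ [] then PySem.Chars.strip (x ++ [' '] ++ c) else x) :: pvMergeRec r cs

theorem pvMergeRec_nil (cs : List (List Char)) : pvMergeRec [] cs = cs := by
  induction cs with
  | nil => rfl
  | cons c cs ih => simp [pvMergeRec, ih]

theorem pvMergeAux (cs : List (List Char)) : ∀ (pre r : List (List Char)),
    (PySem.List.enumerate cs ((pre.length : Int))).foldl pvMergeStepA (pre ++ r) =
      pre ++ pvMergeRec r cs := by
  induction cs with
  | nil => intro pre r; simp [PySem.List.enumerate_nil, pvMergeRec]
  | cons c cs ih =>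
    intro pre r
    rw [PySem.List.enumerate_cons, List.foldl_cons]
    cases r with
    | nil =>
      have hstep : pvMergeStepA (pre ++ []) ((pre.length : Int), c) = (pre ++ [c]) ++ [] := by
        simp [pvMergeStepA]
      rw [hstep]
      have h := ih (pre ++ [c]) []
      have hl : (((pre ++ [c]).length : Int)) = (pre.length : Int) + 1 := by
        simp
      rw [hl] at h
      rw [h, pvMergeRec_nil, pvMergeRec_nil]
      simp
    | cons x r' =>
      have hlen : ((pre.length : Int)) < PySem.List.len (pre ++ x :: r') := by
        simp [PySem.List.len_eq]
      have hstep : pvMergeStepA (pre ++ x :: r') ((pre.length : Int), c) =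
          (pre ++ [if c ≠ [] then PySem.Chars.strip (x ++ [' '] ++ c) else x]) ++ r' := by
        by_cases hc : c = []
        · simp [pvMergeStepA, hc, hlen]
        · have hget : PySem.List.pyGetD (pre ++ x :: r') ((pre.length : Int)) [] = x := by
            simp [List.getD]
          have hset : PySem.List.pySetD (pre ++ x :: r')
              ((pre.length : Int)) (PySem.Chars.strip (x ++ [' '] ++ c)) =
              pre ++ PySem.Chars.strip (x ++ [' '] ++ c) :: r' := by
            simp
          simp [pvMergeStepA, hc, hlen, hget, hset]
      rw [hstep]
      have h := ih (pre ++ [if c ≠ [] then PySem.Chars.strip (x ++ [' '] ++ c) else x]) r'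
      have hl : ((((pre ++ [if c ≠ [] then PySem.Chars.strip (x ++ [' '] ++ c) else x]).length : Int))) =
          (pre.length : Int) + 1 := by
        simp
      rw [hl] at h
      rw [h]
      simp [pvMergeRec]

theorem pvMergeA_eq (r cs : List (List Char)) : pvMergeA r cs = pvMergeRec r cs := by
  have h := pvMergeAux cs [] r
  simpa [pvMergeA] using h

theorem length_pvMergeRec (r cs : List (List Char)) :
    (pvMergeRec r cs).length = max r.length cs.length := by
  induction r, cs using pvMergeRec.induct with
  | case1 r => simp [pvMergeRec]
  | case2 c cs ih => simp [pvMergeRec, pvMergeRec_nil]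
  | case3 x r c cs ih => simp [pvMergeRec, ih]

theorem getElem?_pvMergeRec (r cs : List (List Char)) (j : Nat) :
    (pvMergeRec r cs)[j]? =
      match r[j]?, cs[j]? with
      | some x, some c => some (if c ≠ [] then PySem.Chars.strip (x ++ [' '] ++ c) else x)
      | some x, none => some x
      | none, some c => some c
      | none, none => none := by
  induction r, cs using pvMergeRec.induct generalizing j with
  | case1 r => cases hr : r[j]? <;> simp [pvMergeRec, hr]
  | case2 c cs ih =>
    rw [pvMergeRec_nil]
    cases hc : (c :: cs)[j]? <;> simp [hc]
  | case3 x r c cs ih =>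
    cases j with
    | zero => simp [pvMergeRec]
    | succ j => simpa [pvMergeRec] using ih j

-- block-level abstractions used only by the proofs
def pvMF (bl : List (List (List Char))) : List (List Char) := bl.foldl pvMergeRec []

def pvNC (bl : List (List (List Char))) : Nat := bl.foldl (fun n cs => max n cs.length) 0

def pvCol (bl : List (List (List Char))) (j : Nat) : List Char :=
  PySem.Chars.join [' ']
    ((bl.filter (fun cs => decide (j < cs.length) && decide (cs.getD j [] ≠ []))).map
      (fun cs => cs.getD j []))

def pvCleanB (bl : List (List (List Char))) : Prop := ∀ cs ∈ bl, ∀ x ∈ cs, pvClean x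

theorem pvMF_append (bl : List (List (List Char))) (cs : List (List Char)) :
    pvMF (bl ++ [cs]) = pvMergeRec (pvMF bl) cs := by simp [pvMF]

theorem pvNC_append (bl : List (List (List Char))) (cs : List (List Char)) :
    pvNC (bl ++ [cs]) = max (pvNC bl) cs.length := by simp [pvNC]

theorem length_pvMF (bl : List (List (List Char))) : (pvMF bl).length = pvNC bl := by
  induction bl using List.reverseRecOn with
  | nil => rfl
  | append_singleton bl cs ih => rw [pvMF_append, length_pvMergeRec, ih, pvNC_append]

theorem pvLen_le_pvNC (bl : List (List (List Char))) (cs : List (List Char)) (h : cs ∈ bl) :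
    cs.length ≤ pvNC bl := by
  have he : pvNC bl = (bl.map List.length).foldl max 0 := by simp [pvNC, List.foldl_map]
  rw [he]
  exact (PySem.List.le_foldl_max _ _).2 _ (List.mem_map_of_mem h)

theorem pvFoldlMax_cast (ns : List (List (List Char))) (a : Nat) :
    (ns.map PySem.List.len).foldl max ((a : Int)) =
      ((ns.foldl (fun n cs => max n cs.length) a : Nat) : Int) := by
  induction ns generalizing a with
  | nil => rfl
  | cons c t ih =>
    simp only [List.map_cons, List.foldl_cons, PySem.List.len_eq]
    rw [← Nat.cast_max, ih]

theorem pvNcolsB_eq (bl : List (List (List Char))) : pvNcolsB bl = ((pvNC bl : Nat) : Int) := by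
  cases bl with
  | nil => rfl
  | cons b t =>
    unfold pvNcolsB pvNC PySem.List.maxD
    rw [List.map_cons, show PySem.List.len b = ((b.length : Nat) : Int) from by simp]
    rw [PySem.List.max?_id_cons, Option.getD_some, pvFoldlMax_cast t b.length]
    simp

theorem pvColB_natCast (bl : List (List (List Char))) (k : Nat) :
    pvColB bl ((k : Int)) = pvCol bl k := by
  unfold pvColB pvCol
  simp [List.getD]

theorem pvJoin_append (sep : List Char) (ps : List (List Char)) (c : List Char) :
    PySem.Chars.join sep (ps ++ [c]) =
      if ps = [] then c else PySem.Chars.join sep ps ++ sep ++ c := by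
  induction ps with
  | nil => simp [PySem.Chars.join_singleton]
  | cons p ps ih =>
    cases ps with
    | nil =>
      rw [show ([p] : List (List Char)) ++ [c] = [p, c] from rfl, PySem.Chars.join_cons_cons]
      simp [PySem.Chars.join_singleton]
    | cons q qs =>
      rw [show (p :: q :: qs) ++ [c] = p :: ((q :: qs) ++ [c]) from rfl]
      rw [show (q :: qs) ++ [c] = q :: (qs ++ [c]) from rfl, PySem.Chars.join_cons_cons]
      rw [show q :: (qs ++ [c]) = (q :: qs) ++ [c] from rfl, ih]
      rw [if_neg (by simp), PySem.Chars.join_cons_cons]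
      simp

theorem pvJoin_clean (ps : List (List Char)) (h : ∀ p ∈ ps, pvClean p ∧ p ≠ []) :
    pvClean (PySem.Chars.join [' '] ps) ∧ (ps ≠ [] → PySem.Chars.join [' '] ps ≠ []) := by
  induction ps using List.reverseRecOn with
  | nil => exact ⟨rfl, by simp⟩
  | append_singleton ps c ih =>
    have hc := h c (by simp)
    have ih' := ih (fun p hp => h p (by simp [hp]))
    rw [pvJoin_append]
    by_cases hps : ps = []
    · rw [if_pos hps]
      exact ⟨hc.1, fun _ => hc.2⟩
    · rw [if_neg hps]
      have hjne := ih'.2 hps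
      refine ⟨?_, fun _ => by simp⟩
      show PySem.Chars.strip _ = _
      rw [pvStrip_sep _ _ ih'.1 hc.1 hc.2, if_neg hjne]

theorem pvCol_pieces (bl : List (List (List Char))) (hb : pvCleanB bl) (j : Nat) :
    ∀ p ∈ (bl.filter (fun cs => decide (j < cs.length) && decide (cs.getD j [] ≠ []))).map
      (fun cs => cs.getD j []), pvClean p ∧ p ≠ [] := by
  intro p hp
  simp only [List.mem_map, List.mem_filter] at hp
  obtain ⟨cs, ⟨hcs, hcond⟩, rfl⟩ := hp
  simp only [Bool.and_eq_true, decide_eq_true_eq] at hcond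
  refine ⟨?_, hcond.2⟩
  rw [List.getD_eq_getElem cs [] hcond.1]
  exact hb cs hcs _ (List.getElem_mem _)

theorem pvCol_clean (bl : List (List (List Char))) (hb : pvCleanB bl) (j : Nat) :
    pvClean (pvCol bl j) := (pvJoin_clean _ (pvCol_pieces bl hb j)).1

theorem pvCol_nil_iff (bl : List (List (List Char))) (hb : pvCleanB bl) (j : Nat) :
    pvCol bl j = [] ↔
      (bl.filter (fun cs => decide (j < cs.length) && decide (cs.getD j [] ≠ []))).map
        (fun cs => cs.getD j []) = [] := by
  constructor
  · intro h
    by_contra hne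
    exact (pvJoin_clean _ (pvCol_pieces bl hb j)).2 hne h
  · intro h
    unfold pvCol
    rw [h]
    rfl

theorem pvCol_of_ge (bl : List (List (List Char))) (j : Nat) (h : pvNC bl ≤ j) :
    pvCol bl j = [] := by
  unfold pvCol
  have hf : bl.filter (fun cs => decide (j < cs.length) && decide (cs.getD j [] ≠ [])) = [] := by
    apply List.filter_eq_nil_iff.mpr
    intro cs hcs
    have := pvLen_le_pvNC bl cs hcs
    simp only [Bool.and_eq_true, decide_eq_true_eq, not_and]
    intro hlt
    omega
  rw [hf]
  rfl

theorem pvCol_append (bl : List (List (List Char))) (cs : List (List Char))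
    (hb : pvCleanB bl) (j : Nat) :
    pvCol (bl ++ [cs]) j =
      if j < cs.length ∧ cs.getD j [] ≠ [] then
        (if pvCol bl j = [] then cs.getD j [] else pvCol bl j ++ [' '] ++ cs.getD j [])
      else pvCol bl j := by
  conv_lhs => unfold pvCol
  rw [List.filter_append, List.map_append]
  by_cases hc : j < cs.length ∧ cs.getD j [] ≠ []
  · rw [if_pos hc]
    rw [List.filter_singleton, show (decide (j < cs.length) && decide (cs.getD j [] ≠ [])) = true
        from by simp only [Bool.and_eq_true, decide_eq_true_eq]; exact hc]
    rw [Bool.cond_true, List.map_singleton, pvJoin_append]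
    obtain ⟨hmp, hmpr⟩ := pvCol_nil_iff bl hb j
    by_cases h0 : pvCol bl j = []
    · rw [if_pos h0, if_pos (hmp h0)]
    · rw [if_neg h0, if_neg (fun hh => h0 (hmpr hh))]
      rfl
  · rw [if_neg hc]
    rw [List.filter_singleton, show (decide (j < cs.length) && decide (cs.getD j [] ≠ [])) = false
        from by rw [Bool.eq_false_iff]; simp only [ne_eq, Bool.and_eq_true, decide_eq_true_eq]
                exact hc]
    rw [Bool.cond_false, List.map_nil, List.append_nil]
    rfl

theorem pvMF_getElem? (bl : List (List (List Char))) (hb : pvCleanB bl) (j : Nat) :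
    (pvMF bl)[j]? = if j < pvNC bl then some (pvCol bl j) else none := by
  induction bl using List.reverseRecOn with
  | nil => simp [pvMF, pvNC]
  | append_singleton bl cs ih =>
    have hbbl : pvCleanB bl := fun c hc => hb c (by simp [hc])
    have ihh := ih hbbl
    have hcsclean : ∀ x ∈ cs, pvClean x := hb cs (by simp)
    rw [pvMF_append, getElem?_pvMergeRec, ihh, pvNC_append, pvCol_append bl cs hbbl j]
    by_cases h2 : j < cs.length
    · have hgd : cs.getD j [] = cs[j] := List.getD_eq_getElem cs [] h2
      rw [List.getElem?_eq_getElem h2, hgd]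
      by_cases hcj : cs[j] = [] <;> by_cases h1 : j < pvNC bl
      · simp [h1, h2, hcj, lt_max_iff]
      · simp [h1, h2, hcj, lt_max_iff, pvCol_of_ge bl j (by omega)]
      · have hss := pvStrip_sep (pvCol bl j) cs[j] (pvCol_clean bl hbbl j)
          (hcsclean _ (List.getElem_mem _)) hcj
        simp [h1, h2, hcj, lt_max_iff]
        simpa using hss
      · simp [h1, h2, hcj, lt_max_iff, pvCol_of_ge bl j (by omega)]
    · rw [List.getElem?_eq_none (by omega)]
      by_cases h1 : j < pvNC bl
      · simp [h1, h2, lt_max_iff]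
      · simp [h1, h2, lt_max_iff]

theorem pvRowB_eq (bl : List (List (List Char))) (hb : pvCleanB bl) :
    (pvMF bl).map PySem.Chars.strip = pvRowB bl := by
  unfold pvRowB
  rw [pvNcolsB_eq, PySem.List.pyRange_one]
  have hn : (((pvNC bl : Nat) : Int) - 0).toNat = pvNC bl := by simp
  rw [hn, List.map_map]
  apply List.ext_getElem?
  intro k
  rw [List.getElem?_map, List.getElem?_map, pvMF_getElem? bl hb k]
  by_cases hk : k < pvNC bl
  · rw [List.getElem?_range hk, if_pos hk]
    simp only [Option.map_some, Function.comp_apply]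
    rw [show ((0 : Int) + (k : Int)) = ((k : Int)) from by ring, pvColB_natCast]
    rw [pvCol_clean bl hb k]
  · rw [List.getElem?_eq_none (by simpa using hk), if_neg hk]
    rfl

-- whole-table abstractions
def pvFlush (done : List (List (List (List Char)))) : List (List (List Char)) :=
  (done.filter (fun bl => decide (pvMF bl ≠ []))).map (fun bl => (pvMF bl).map PySem.Chars.strip)

def pvCleanBB (done : List (List (List (List Char)))) : Prop := ∀ bl ∈ done, pvCleanB bl

theorem pvIsSepB_eq : pvIsSepB = pvIsSepA := rfl

theorem pvCellsB_eq : pvCellsB = pvCellsA := rfl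

theorem pvStepA_strip (st : List (List (List Char)) × List (List Char)) (l : List Char) :
    pvStepA st (PySem.Chars.strip l) = pvStepA st l := by
  simp only [pvStepA, pvStrip_idem]

theorem pvCellsA_clean (s : List Char) : ∀ x ∈ pvCellsA s, pvClean x := by
  intro x hx
  simp only [pvCellsA, List.mem_map] at hx
  obtain ⟨y, _, rfl⟩ := hx
  exact pvStrip_clean y

theorem pvFlush_append (done : List (List (List (List Char)))) (cur : List (List (List Char))) :
    pvFlush (done ++ [cur]) =
      if pvMF cur ≠ [] then pvFlush done ++ [(pvMF cur).map PySem.Chars.strip]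
      else pvFlush done := by
  unfold pvFlush
  rw [List.filter_append, List.map_append]
  by_cases h : pvMF cur = [] <;> simp [h]

theorem pvMF_nil_iff (bl : List (List (List Char))) : pvMF bl = [] ↔ pvNcolsB bl = 0 := by
  rw [pvNcolsB_eq, ← List.length_eq_zero_iff, length_pvMF]
  omega

theorem pvSim (ls : List (List Char)) : ∀ (done : List (List (List (List Char))))
    (cur : List (List (List Char))),
    (∀ s ∈ ls, PySem.Chars.strip s = s) → pvCleanB cur → pvCleanBB done →
    ls.foldl pvStepA (pvFlush done, pvMF cur) =
      (pvFlush (ls.foldl pvBlocksStepB (done, cur)).1,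
        pvMF (ls.foldl pvBlocksStepB (done, cur)).2) ∧
      pvCleanB (ls.foldl pvBlocksStepB (done, cur)).2 ∧
      pvCleanBB (ls.foldl pvBlocksStepB (done, cur)).1 := by
  induction ls with
  | nil => exact fun done cur _ hc hd => ⟨rfl, hc, hd⟩
  | cons s ls ih =>
    intro done cur hs hc hd
    have hss : PySem.Chars.strip s = s := hs s (by simp)
    rw [List.foldl_cons, List.foldl_cons]
    by_cases hsep : pvIsSepA s = true
    · have hA : pvStepA (pvFlush done, pvMF cur) s = (pvFlush (done ++ [cur]), pvMF []) := by
        simp only [pvStepA]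
        rw [hss, if_pos hsep, pvFlush_append]
        by_cases hMF : pvMF cur = [] <;> simp [hMF] <;> rfl
      have hB : pvBlocksStepB (done, cur) s = (done ++ [cur], []) := by
        simp [pvBlocksStepB, pvIsSepB_eq, hsep]
      rw [hA, hB]
      exact ih (done ++ [cur]) [] (fun t ht => hs t (by simp [ht]))
        (fun cs h => absurd h (List.not_mem_nil))
        (by intro bl hbl
            rcases List.mem_append.mp hbl with h | h
            · exact hd bl h
            · rw [List.mem_singleton] at h; subst h; exact hc)
    · by_cases hpipe : PySem.Chars.startswith s ['|'] = true
      · have hA : pvStepA (pvFlush done, pvMF cur) s =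
            (pvFlush done, pvMF (cur ++ [pvCellsA s])) := by
          simp only [pvStepA]
          rw [hss, if_neg hsep, if_pos hpipe, pvMF_append]
          by_cases hMF : pvMF cur = [] <;>
            simp [hMF, pvMergeA_eq, pvMergeRec_nil]
        have hB : pvBlocksStepB (done, cur) s = (done, cur ++ [pvCellsB s]) := by
          simp [pvBlocksStepB, pvIsSepB_eq, hsep, hpipe]
        rw [hA, hB, pvCellsB_eq]
        exact ih done (cur ++ [pvCellsA s]) (fun t ht => hs t (by simp [ht]))
          (by intro cs h
              rcases List.mem_append.mp h with h | h
              · exact hc cs h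
              · rw [List.mem_singleton] at h; subst h; exact pvCellsA_clean s)
          hd
      · have hA : pvStepA (pvFlush done, pvMF cur) s = (pvFlush done, pvMF cur) := by
          simp [pvStepA, hss, hsep, hpipe]
        have hB : pvBlocksStepB (done, cur) s = (done, cur) := by
          simp [pvBlocksStepB, pvIsSepB_eq, hsep, hpipe]
        rw [hA, hB]
        exact ih done cur (fun t ht => hs t (by simp [ht])) hc hd

theorem pvRows_eq (blocks : List (List (List (List Char)))) (h : pvCleanBB blocks) :
    ∀ acc, blocks.foldl (fun rows bl =>
        if pvNcolsB bl = 0 then rows else rows ++ [pvRowB bl]) acc = acc ++ pvFlush blocks := by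
  induction blocks with
  | nil => intro acc; simp [pvFlush]
  | cons bl blocks ih =>
    intro acc
    have hbl : pvCleanB bl := h bl (by simp)
    have hrest : pvCleanBB blocks := fun b hb => h b (by simp [hb])
    have hflush : pvFlush (bl :: blocks) =
        (if pvMF bl ≠ [] then [(pvMF bl).map PySem.Chars.strip] else []) ++ pvFlush blocks := by
      unfold pvFlush
      by_cases hMF : pvMF bl = [] <;> simp [hMF]
    rw [List.foldl_cons, hflush]
    by_cases h0 : pvNcolsB bl = 0
    · rw [if_pos h0, if_neg (by simp only [ne_eq, not_not, pvMF_nil_iff]; exact h0), ih hrest]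
      simp
    · rw [if_neg h0, if_pos (by simp only [ne_eq, pvMF_nil_iff]; exact h0), ih hrest, pvRowB_eq bl hbl]
      simp

theorem pvFlush_head_clean (blocks : List (List (List (List Char)))) (row : List (List Char))
    (h : row ∈ pvFlush blocks) :
    PySem.Chars.strip (row.headD []) = row.headD [] := by
  simp only [pvFlush, List.mem_map, List.mem_filter] at h
  obtain ⟨bl, _, rfl⟩ := h
  cases hm : pvMF bl with
  | nil => rfl
  | cons a t => simp [pvStrip_idem]

theorem pv_main (text : String) : parse_eds_table text = parse_eds_table_alt text := by
  simp only [parse_eds_table, parse_eds_table_alt]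
  set L := (PySem.Chars.splitlines (PySem.Chars.strip text.toList)).filter
      (fun l => PySem.Chars.strip l ≠ []) with hLdef
  by_cases hL : L = []
  · rw [if_pos hL, hL]
    rfl
  · rw [if_neg hL]
    have hls : ∀ s ∈ L.map PySem.Chars.strip, PySem.Chars.strip s = s := by
      intro s hsm
      simp only [List.mem_map] at hsm
      obtain ⟨y, _, rfl⟩ := hsm
      exact pvStrip_idem y
    have hfoldA : L.foldl pvStepA ([], []) =
        (L.map PySem.Chars.strip).foldl pvStepA ([], []) := by
      rw [List.foldl_map]
      congr 1
      funext st l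
      exact (pvStepA_strip st l).symm
    obtain ⟨heq, hclean2, hclean1⟩ := pvSim (L.map PySem.Chars.strip) [] [] hls
      (fun cs h => absurd h (List.not_mem_nil)) (fun bl h => absurd h (List.not_mem_nil))
    rw [hfoldA]
    rw [show (pvFlush [], pvMF ([] : List (List (List Char)))) =
        (([] : List (List (List Char))), ([] : List (List Char))) from rfl] at heq
    rw [heq]
    set B := (L.map PySem.Chars.strip).foldl pvBlocksStepB ([], []) with hBdef
    have hcleanBB : pvCleanBB (B.1 ++ [B.2]) := by
      intro bl hbl
      rcases List.mem_append.mp hbl with h | h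
      · exact hclean1 bl h
      · rw [List.mem_singleton] at h; subst h; exact hclean2
    have hrows : (if pvMF B.2 ≠ [] then pvFlush B.1 ++ [(pvMF B.2).map PySem.Chars.strip]
        else pvFlush B.1) = pvFlush (B.1 ++ [B.2]) := (pvFlush_append B.1 B.2).symm
    rw [hrows, pvRows_eq (B.1 ++ [B.2]) hcleanBB []]
    rw [List.nil_append]
    by_cases hle : pvFlush (B.1 ++ [B.2]) = []
    · rw [if_pos hle, if_pos hle]
    · rw [if_neg hle, if_neg hle]
      have hhead : (pvFlush (B.1 ++ [B.2])).headD [] ∈ pvFlush (B.1 ++ [B.2]) := by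
        cases hc : pvFlush (B.1 ++ [B.2]) with
        | nil => exact absurd hc hle
        | cons a t => simp
      rw [pvFlush_head_clean _ _ hhead]

-- ===== VERDICT (by name: the statement is the Claim_ definition above) =====
theorem parse_eds_table_spec : Claim_equal_parse_eds_table := by
  intro text _
  exact pv_main text
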